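-- pv_equiv track=rewrite | github.com/alexander-stage-hoco/project-caldera | src/insights/sections/language_coverage.py | _categorize_languages
-- ===== SOURCE A (Python) =====
-- def _categorize_languages(languages: list[dict]) -> dict[str, list[dict]]:
--     """Categorize languages by type."""
--     categories = {
--         "compiled": [],
--         "scripted": [],
--         "markup": [],
--         "config": [],
--         "other": [],
--     }
--
--     compiled_langs = {"C#", "Java", "Go", "Rust", "C", "C++", "Kotlin", "Swift", "TypeScript"}
--     scripted_langs = {"Python", "JavaScript", "Ruby", "PHP", "Perl", "Shell", "Bash", "PowerShell"}
--     markup_langs = {"HTML", "XML", "Markdown", "CSS", "SCSS", "Less", "YAML", "JSON"}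
--     config_langs = {"TOML", "INI", "Properties", "Dockerfile", "Makefile"}
--
--     for lang in languages:
--         lang_name = lang.get("language", "")
--         if lang_name in compiled_langs:
--             categories["compiled"].append(lang)
--         elif lang_name in scripted_langs:
--             categories["scripted"].append(lang)
--         elif lang_name in markup_langs:
--             categories["markup"].append(lang)
--         elif lang_name in config_langs:
--             categories["config"].append(lang)
--         else:
--             categories["other"].append(lang)
--
--     return categories
-- ===== SOURCE B (Python) =====
-- _LANG_SETS = [
--     ("compiled", {"C#", "Java", "Go", "Rust", "C", "C++", "Kotlin", "Swift", "TypeScript"}),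
--     ("scripted", {"Python", "JavaScript", "Ruby", "PHP", "Perl", "Shell", "Bash", "PowerShell"}),
--     ("markup", {"HTML", "XML", "Markdown", "CSS", "SCSS", "Less", "YAML", "JSON"}),
--     ("config", {"TOML", "INI", "Properties", "Dockerfile", "Makefile"}),
-- ]
--
--
-- def _categorize_languages(languages: list[dict]) -> dict[str, list[dict]]:
--     """Categorize languages by type: one filtering pass per category.
--
--     The category sets are pairwise disjoint, so the per-category filters
--     partition the known languages; a final pass collects the rest as "other".
--     Order within each bucket is the input order, as with single-pass bucketing.
--     """
--     known = set()
--     result = {}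
--     for cat, names in _LANG_SETS:
--         result[cat] = [lang for lang in languages if lang.get("language", "") in names]
--         known |= names
--     result["other"] = [lang for lang in languages if lang.get("language", "") not in known]
--     return result
-- ===== Notes on version B (the rewrite author's own statement) =====
-- stated objective: alternative
-- what changed: Replaces the single-pass if/elif bucketing loop with staged passes: one filter comprehension per category (the category sets are disjoint, so order and membership are preserved) plus a final pass collecting the unmatched languages as 'other'.
import Mathlib
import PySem

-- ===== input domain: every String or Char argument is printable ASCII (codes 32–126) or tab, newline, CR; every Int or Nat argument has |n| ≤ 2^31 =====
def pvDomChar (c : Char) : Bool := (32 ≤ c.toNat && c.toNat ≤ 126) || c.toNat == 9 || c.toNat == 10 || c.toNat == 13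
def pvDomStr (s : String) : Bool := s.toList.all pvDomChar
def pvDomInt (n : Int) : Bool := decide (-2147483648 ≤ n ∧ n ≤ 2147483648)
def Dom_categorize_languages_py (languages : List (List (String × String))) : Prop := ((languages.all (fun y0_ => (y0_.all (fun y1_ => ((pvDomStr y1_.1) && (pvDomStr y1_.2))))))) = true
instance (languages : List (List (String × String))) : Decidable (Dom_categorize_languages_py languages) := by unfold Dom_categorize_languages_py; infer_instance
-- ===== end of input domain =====

-- B replaces A's single-pass if/elif bucketing loop by staged passes: one filter
-- per (disjoint) category set, then a final pass collecting the rest as "other".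

-- ===== PORT A =====
def pvCompiledLangs : PySem.Set String :=
  PySem.Set.ofList ["C#", "Java", "Go", "Rust", "C", "C++", "Kotlin", "Swift", "TypeScript"]
def pvScriptedLangs : PySem.Set String :=
  PySem.Set.ofList ["Python", "JavaScript", "Ruby", "PHP", "Perl", "Shell", "Bash", "PowerShell"]
def pvMarkupLangs : PySem.Set String :=
  PySem.Set.ofList ["HTML", "XML", "Markdown", "CSS", "SCSS", "Less", "YAML", "JSON"]
def pvConfigLangs : PySem.Set String :=
  PySem.Set.ofList ["TOML", "INI", "Properties", "Dockerfile", "Makefile"]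

def pvInitCatsA : PySem.Dict String (List (List (String × String))) :=
  ((((PySem.Dict.empty.insert "compiled" []).insert "scripted" []).insert "markup" []).insert
      "config" []).insert "other" []

-- the body of A's for-loop
def pvStepA (cats : PySem.Dict String (List (List (String × String))))
    (lang : List (String × String)) : PySem.Dict String (List (List (String × String))) :=
  let langName := (PySem.Dict.mk lang).getD "language" ""
  if PySem.Set.contains pvCompiledLangs langName then cats.modify "compiled" [] (· ++ [lang])
  else if PySem.Set.contains pvScriptedLangs langName then cats.modify "scripted" [] (· ++ [lang])
  else if PySem.Set.contains pvMarkupLangs langName then cats.modify "markup" [] (· ++ [lang])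
  else if PySem.Set.contains pvConfigLangs langName then cats.modify "config" [] (· ++ [lang])
  else cats.modify "other" [] (· ++ [lang])

def categorize_languages_py (languages : List (List (String × String))) :
    List (String × List (List (String × String))) :=
  (languages.foldl pvStepA pvInitCatsA).items

-- ===== PORT B =====
def pvLangSets : List (String × PySem.Set String) :=
  [("compiled", pvCompiledLangs), ("scripted", pvScriptedLangs),
   ("markup", pvMarkupLangs), ("config", pvConfigLangs)]

-- the body of B's for-loop over the category table: one filter pass per category,
-- accumulating (result dict, known names)
def pvStepB (languages : List (List (String × String)))
    (st : PySem.Dict String (List (List (String × String))) × PySem.Set String)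
    (p : String × PySem.Set String) :
    PySem.Dict String (List (List (String × String))) × PySem.Set String :=
  (st.1.insert p.1
      (languages.filter (fun lang => p.2.contains ((PySem.Dict.mk lang).getD "language" ""))),
   PySem.Set.union st.2 p.2)

def categorize_languages_py_alt (languages : List (List (String × String))) :
    List (String × List (List (String × String))) :=
  let st := pvLangSets.foldl (pvStepB languages) (PySem.Dict.empty, PySem.Set.empty)
  (st.1.insert "other"
      (languages.filter
        (fun lang => !(st.2.contains ((PySem.Dict.mk lang).getD "language" ""))))).items

-- ===== PRECONDITION & SPEC =====
def Spec_categorize_languages_py (languages : List (List (String × String))) (out : List (String × List (List (String × String)))) : Prop := out = categorize_languages_py_alt languages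
instance (languages : List (List (String × String))) (out : List (String × List (List (String × String)))) : Decidable (Spec_categorize_languages_py languages out) := by unfold Spec_categorize_languages_py; infer_instance

-- ===== CLAIM (what is proved, stated in full; the proofs are below) =====
def Claim_equal_categorize_languages_py : Prop := ∀ (languages : List (List (String × String))), Dom_categorize_languages_py languages → Spec_categorize_languages_py languages (categorize_languages_py languages)

-- ===== LEMMAS AND PROOFS =====

-- the category A's cascade assigns to a language's name
def pvCatOf (lang : List (String × String)) : String :=
  let langName := (PySem.Dict.mk lang).getD "language" ""
  if PySem.Set.contains pvCompiledLangs langName then "compiled"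
  else if PySem.Set.contains pvScriptedLangs langName then "scripted"
  else if PySem.Set.contains pvMarkupLangs langName then "markup"
  else if PySem.Set.contains pvConfigLangs langName then "config"
  else "other"

lemma stepA_eq_modify (cats : PySem.Dict String (List (List (String × String))))
    (lang : List (String × String)) :
    pvStepA cats lang = cats.modify (pvCatOf lang) [] (· ++ [lang]) := by
  simp only [pvStepA, pvCatOf]
  split_ifs <;> rfl

-- A's loop is the generic grouping fold over the (category, language) pairs
lemma foldA_eq (languages : List (List (String × String))) :
    languages.foldl pvStepA pvInitCatsA =
      (languages.map (fun l => (pvCatOf l, l))).foldl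
        (fun d p => d.modify p.1 [] (· ++ [p.2])) pvInitCatsA := by
  rw [List.foldl_map]
  congr 1
  funext d l
  exact stepA_eq_modify d l

lemma alt_items (languages : List (List (String × String))) :
    categorize_languages_py_alt languages =
      [("compiled", languages.filter (fun lang => pvCompiledLangs.contains ((PySem.Dict.mk lang).getD "language" ""))),
       ("scripted", languages.filter (fun lang => pvScriptedLangs.contains ((PySem.Dict.mk lang).getD "language" ""))),
       ("markup", languages.filter (fun lang => pvMarkupLangs.contains ((PySem.Dict.mk lang).getD "language" ""))),
       ("config", languages.filter (fun lang => pvConfigLangs.contains ((PySem.Dict.mk lang).getD "language" ""))),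
       ("other", languages.filter (fun lang => !((PySem.Set.union (PySem.Set.union (PySem.Set.union (PySem.Set.union PySem.Set.empty pvCompiledLangs) pvScriptedLangs) pvMarkupLangs) pvConfigLangs).contains ((PySem.Dict.mk lang).getD "language" ""))))] := by
  simp only [categorize_languages_py_alt, pvLangSets, pvStepB, List.foldl_cons, List.foldl_nil]
  simp [PySem.Dict.insert, PySem.Dict.contains, PySem.Dict.empty]

lemma known_contains (n : String) :
    (PySem.Set.union (PySem.Set.union (PySem.Set.union (PySem.Set.union PySem.Set.empty pvCompiledLangs) pvScriptedLangs) pvMarkupLangs) pvConfigLangs).contains n =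
      (pvCompiledLangs.contains n || pvScriptedLangs.contains n || pvMarkupLangs.contains n || pvConfigLangs.contains n) := by
  rw [Bool.eq_iff_iff]
  simp [PySem.Set.mem_union]

lemma catOf_mem (l : List (String × String)) :
    pvCatOf l ∈ ["compiled", "scripted", "markup", "config", "other"] := by
  simp only [pvCatOf]
  split_ifs <;> decide

lemma foldA_getD (languages : List (List (String × String))) (c : String) :
    (languages.foldl pvStepA pvInitCatsA).getD c [] =
      pvInitCatsA.getD c [] ++ languages.filter (fun l => pvCatOf l == c) := by
  rw [foldA_eq, PySem.Dict.getD_foldl_modify_append, List.filter_map, List.map_map]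
  simp [Function.comp_def]

lemma foldA_keys (languages : List (List (String × String))) :
    (languages.foldl pvStepA pvInitCatsA).keys = ["compiled", "scripted", "markup", "config", "other"] := by
  rw [foldA_eq, PySem.Dict.keys_foldl_modify_key]
  rw [PySem.Set.update_eq_append_filter]
  have h : ((PySem.Set.ofList ((languages.map (fun l => (pvCatOf l, l))).map Prod.fst)).filter
      (fun y => !(PySem.Set.contains pvInitCatsA.keys y))) = [] := by
    apply List.filter_eq_nil_iff.mpr
    intro y hy
    rw [PySem.Set.mem_ofList] at hy
    simp only [List.map_map, List.mem_map] at hy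
    obtain ⟨l, _, rfl⟩ := hy
    have := catOf_mem l
    simp only [Bool.not_eq_true', Bool.not_eq_false]
    rw [PySem.Set.contains_iff]
    simpa [pvInitCatsA, PySem.Dict.keys, PySem.Dict.insert, PySem.Dict.empty, PySem.Dict.contains] using this
  rw [h]
  rfl

-- the four category sets are pairwise disjoint
lemma compiled_not_scripted {n : String} (h : n ∈ pvCompiledLangs) : n ∉ pvScriptedLangs := by
  have hm : n ∈ ["C#", "Java", "Go", "Rust", "C", "C++", "Kotlin", "Swift", "TypeScript"] := by
    simpa [pvCompiledLangs, PySem.Set.mem_ofList] using h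
  fin_cases hm <;> decide
lemma compiled_not_markup {n : String} (h : n ∈ pvCompiledLangs) : n ∉ pvMarkupLangs := by
  have hm : n ∈ ["C#", "Java", "Go", "Rust", "C", "C++", "Kotlin", "Swift", "TypeScript"] := by
    simpa [pvCompiledLangs, PySem.Set.mem_ofList] using h
  fin_cases hm <;> decide
lemma compiled_not_config {n : String} (h : n ∈ pvCompiledLangs) : n ∉ pvConfigLangs := by
  have hm : n ∈ ["C#", "Java", "Go", "Rust", "C", "C++", "Kotlin", "Swift", "TypeScript"] := by
    simpa [pvCompiledLangs, PySem.Set.mem_ofList] using h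
  fin_cases hm <;> decide
lemma scripted_not_markup {n : String} (h : n ∈ pvScriptedLangs) : n ∉ pvMarkupLangs := by
  have hm : n ∈ ["Python", "JavaScript", "Ruby", "PHP", "Perl", "Shell", "Bash", "PowerShell"] := by
    simpa [pvScriptedLangs, PySem.Set.mem_ofList] using h
  fin_cases hm <;> decide
lemma scripted_not_config {n : String} (h : n ∈ pvScriptedLangs) : n ∉ pvConfigLangs := by
  have hm : n ∈ ["Python", "JavaScript", "Ruby", "PHP", "Perl", "Shell", "Bash", "PowerShell"] := by
    simpa [pvScriptedLangs, PySem.Set.mem_ofList] using h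
  fin_cases hm <;> decide
lemma markup_not_config {n : String} (h : n ∈ pvMarkupLangs) : n ∉ pvConfigLangs := by
  have hm : n ∈ ["HTML", "XML", "Markdown", "CSS", "SCSS", "Less", "YAML", "JSON"] := by
    simpa [pvMarkupLangs, PySem.Set.mem_ofList] using h
  fin_cases hm <;> decide

lemma filter_compiled (languages : List (List (String × String))) :
    languages.filter (fun l => pvCatOf l == "compiled") =
      languages.filter (fun l => pvCompiledLangs.contains ((PySem.Dict.mk l).getD "language" "")) := by
  apply List.filter_congr
  intro l _
  simp only [pvCatOf]
  split_ifs with h1 h2 h3 h4 <;> simp_all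

lemma filter_scripted (languages : List (List (String × String))) :
    languages.filter (fun l => pvCatOf l == "scripted") =
      languages.filter (fun l => pvScriptedLangs.contains ((PySem.Dict.mk l).getD "language" "")) := by
  apply List.filter_congr
  intro l _
  simp only [pvCatOf]
  split_ifs with h1 h2 h3 h4 <;> simp_all [compiled_not_scripted]

lemma filter_markup (languages : List (List (String × String))) :
    languages.filter (fun l => pvCatOf l == "markup") =
      languages.filter (fun l => pvMarkupLangs.contains ((PySem.Dict.mk l).getD "language" "")) := by
  apply List.filter_congr
  intro l _
  simp only [pvCatOf]
  split_ifs with h1 h2 h3 h4 <;> simp_all [compiled_not_markup, scripted_not_markup]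

lemma filter_config (languages : List (List (String × String))) :
    languages.filter (fun l => pvCatOf l == "config") =
      languages.filter (fun l => pvConfigLangs.contains ((PySem.Dict.mk l).getD "language" "")) := by
  apply List.filter_congr
  intro l _
  simp only [pvCatOf]
  split_ifs with h1 h2 h3 h4 <;> simp_all [compiled_not_config, scripted_not_config, markup_not_config]

lemma filter_other (languages : List (List (String × String))) :
    languages.filter (fun l => pvCatOf l == "other") =
      languages.filter (fun l => !((PySem.Set.union (PySem.Set.union (PySem.Set.union (PySem.Set.union PySem.Set.empty pvCompiledLangs) pvScriptedLangs) pvMarkupLangs) pvConfigLangs).contains ((PySem.Dict.mk l).getD "language" ""))) := by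
  apply List.filter_congr
  intro l _
  rw [known_contains]
  simp only [pvCatOf]
  split_ifs with h1 h2 h3 h4 <;> simp_all

-- ===== VERDICT (by name: the statement is the Claim_ definition above) =====
theorem categorize_languages_py_spec : Claim_equal_categorize_languages_py := by
  intro languages _
  unfold Spec_categorize_languages_py categorize_languages_py
  rw [PySem.Dict.items_eq_map_keys _ (by rw [foldA_keys]; decide) [],
    foldA_keys, alt_items]
  simp only [List.map_cons, List.map_nil, foldA_getD]
  rw [filter_compiled, filter_scripted, filter_markup, filter_config, filter_other]
  rfl
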